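-- pv_equiv track=rewrite | github.com/beerbank3/Programmers-Python | 프로그래머스/unrated/181829. 이차원 배열 대각선 순회하기/이차원 배열 대각선 순회하기.py | solution
-- ===== SOURCE A (Python) =====
-- def solution(board, k):
--     rows = len(board)
--     cols = len(board[0])
--     total_sum = 0
--
--     for i in range(rows):
--         for j in range(cols):
--             if i + j <= k:
--                 total_sum += board[i][j]
--
--     return total_sum
-- ===== SOURCE B (Python) =====
-- def solution(board, k):
--     rows = len(board)
--     cols = len(board[0])
--     total = 0
--     for d in range(min(k, rows + cols - 2) + 1):
--         lo = max(0, d - cols + 1)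
--         hi = min(d, rows - 1)
--         for i in range(lo, hi + 1):
--             total += board[i][d - i]
--     return total
-- ===== Notes on version B (the rewrite author's own statement) =====
-- stated objective: alternative
-- what changed: Replaces the row-by-row full scan with a per-cell i+j<=k test by a direct anti-diagonal traversal: for each diagonal d up to min(k, rows+cols-2) it walks the clamped row range and adds board[i][d-i], visiting only the selected cells and never testing the condition.
import Mathlib
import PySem

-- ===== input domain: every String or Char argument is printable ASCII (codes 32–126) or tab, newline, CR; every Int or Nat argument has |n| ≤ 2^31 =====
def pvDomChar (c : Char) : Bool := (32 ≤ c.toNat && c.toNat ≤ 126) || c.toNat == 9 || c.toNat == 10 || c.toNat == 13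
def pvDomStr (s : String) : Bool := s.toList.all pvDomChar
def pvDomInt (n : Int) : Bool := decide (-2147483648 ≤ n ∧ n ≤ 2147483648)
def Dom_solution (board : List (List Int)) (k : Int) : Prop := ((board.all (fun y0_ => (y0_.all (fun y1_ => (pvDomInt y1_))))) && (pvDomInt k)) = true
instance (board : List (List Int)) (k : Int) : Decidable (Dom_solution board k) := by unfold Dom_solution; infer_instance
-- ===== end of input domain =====

-- B sums by anti-diagonals (for each d ≤ min(k, rows+cols-2), add board[i][d-i] over the clamped row range)
-- instead of A's full row-by-row scan with a per-cell i+j<=k test; equal return value on Pre_.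

-- ===== PORT A =====
def solution (board : List (List Int)) (k : Int) : Int :=
  let rows : Int := (board.length : Int)
  let cols : Int := ((PySem.List.pyGetD board 0 []).length : Int)
  (PySem.List.pyRange 0 rows 1).foldl (fun acc i =>
    (PySem.List.pyRange 0 cols 1).foldl (fun acc j =>
      if i + j ≤ k then acc + PySem.List.pyGetD (PySem.List.pyGetD board i []) j 0 else acc) acc) 0

-- ===== PORT B =====
def solution_alt (board : List (List Int)) (k : Int) : Int :=
  let rows : Int := (board.length : Int)
  let cols : Int := ((PySem.List.pyGetD board 0 []).length : Int)
  (PySem.List.pyRange 0 (min k (rows + cols - 2) + 1) 1).foldl (fun acc d =>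
    let lo := max 0 (d - cols + 1)
    let hi := min d (rows - 1)
    (PySem.List.pyRange lo (hi + 1) 1).foldl (fun acc i =>
      acc + PySem.List.pyGetD (PySem.List.pyGetD board i []) (d - i) 0) acc) 0

-- ===== PRECONDITION & SPEC =====
-- Pre_ excludes exactly the inputs on which the Pythons raise IndexError: the empty board (board[0]) and
-- ragged boards where some visited cell board[i][j] (j < len(board[0]), i+j <= k) is past the end of row i.
def Pre_solution (board : List (List Int)) (k : Int) : Prop :=
  board ≠ [] ∧ ∀ p ∈ PySem.List.enumerate board 0,
    ∀ j < (board.headD []).length, (p.1 + (j : Int) ≤ k → j < p.2.length)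
instance (board : List (List Int)) (k : Int) : Decidable (Pre_solution board k) := by
  unfold Pre_solution; infer_instance
def pvWitness_solution : List (List Int) × Int := ([[1, 2], [3, 4]], 1)
def Spec_solution (board : List (List Int)) (k : Int) (out : Int) : Prop := out = solution_alt board k
instance (board : List (List Int)) (k : Int) (out : Int) : Decidable (Spec_solution board k out) := by unfold Spec_solution; infer_instance

-- ===== CLAIM (what is proved, stated in full; the proofs are below) =====
def Claim_equal_solution : Prop := ∀ (board : List (List Int)) (k : Int), Dom_solution board k → Pre_solution board k → Spec_solution board k (solution board k)

-- ===== LEMMAS AND PROOFS =====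

-- a mapped sum over range(a,b) is a Finset.Ico sum
theorem pv_sum_pyRange (F : Int → Int) : ∀ (n : Nat) (a b : Int), (b - a).toNat = n →
    ((PySem.List.pyRange a b 1).map F).sum = ∑ x ∈ Finset.Ico a b, F x := by
  intro n
  induction n with
  | zero =>
    intro a b h
    rw [PySem.List.pyRange_one_eq_nil (by omega), Finset.Ico_eq_empty (by omega)]
    simp
  | succ m ih =>
    intro a b h
    have hab : a < b := by omega
    rw [PySem.List.pyRange_one_cons hab, List.map_cons, List.sum_cons,
        ← Finset.insert_Ico_add_one_left_eq_Ico hab,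
        Finset.sum_insert (by simp [Finset.mem_Ico]), ih (a + 1) b (by omega)]

-- an accumulating fold over range(a,b) is init + the Ico sum
theorem pv_foldl_sum (F : Int → Int) (a b init : Int) :
    (PySem.List.pyRange a b 1).foldl (fun acc x => acc + F x) init
      = init + ∑ x ∈ Finset.Ico a b, F x := by
  rw [PySem.List.foldl_add, pv_sum_pyRange F _ a b rfl]

-- A's port as a rectangular double sum with the i+j<=k test
theorem pv_A (board : List (List Int)) (k : Int) :
    solution board k
      = ∑ i ∈ Finset.Ico 0 (board.length : Int),
          ∑ j ∈ Finset.Ico 0 (((PySem.List.pyGetD board 0 []).length : Int)),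
            (if i + j ≤ k then PySem.List.pyGetD (PySem.List.pyGetD board i []) j 0 else 0) := by
  unfold solution
  have h1 : ∀ (init i : Int),
      (PySem.List.pyRange 0 (((PySem.List.pyGetD board 0 []).length : Int)) 1).foldl
          (fun acc j => if i + j ≤ k then acc + PySem.List.pyGetD (PySem.List.pyGetD board i []) j 0 else acc) init
        = init + ∑ j ∈ Finset.Ico 0 (((PySem.List.pyGetD board 0 []).length : Int)),
            (if i + j ≤ k then PySem.List.pyGetD (PySem.List.pyGetD board i []) j 0 else 0) := by
    intro init i
    have hfun : (fun (acc j : Int) => if i + j ≤ k then acc + PySem.List.pyGetD (PySem.List.pyGetD board i []) j 0 else acc)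
        = fun acc j => acc + (if i + j ≤ k then PySem.List.pyGetD (PySem.List.pyGetD board i []) j 0 else 0) := by
      funext acc j; split_ifs <;> simp
    rw [hfun]
    exact pv_foldl_sum _ 0 _ init
  rw [List.foldl_ext _ _ 0 (fun init i _ => h1 init i), pv_foldl_sum _ 0 _ 0, zero_add]

-- B's port as a sum over anti-diagonals
theorem pv_B (board : List (List Int)) (k : Int) :
    solution_alt board k
      = ∑ d ∈ Finset.Ico 0 (min k ((board.length : Int) + ((PySem.List.pyGetD board 0 []).length : Int) - 2) + 1),
          ∑ i ∈ Finset.Ico (max 0 (d - ((PySem.List.pyGetD board 0 []).length : Int) + 1)) (min d ((board.length : Int) - 1) + 1),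
            PySem.List.pyGetD (PySem.List.pyGetD board i []) (d - i) 0 := by
  unfold solution_alt
  have h1 : ∀ (init d : Int),
      (PySem.List.pyRange (max 0 (d - ((PySem.List.pyGetD board 0 []).length : Int) + 1)) (min d ((board.length : Int) - 1) + 1) 1).foldl
          (fun acc i => acc + PySem.List.pyGetD (PySem.List.pyGetD board i []) (d - i) 0) init
        = init + ∑ i ∈ Finset.Ico (max 0 (d - ((PySem.List.pyGetD board 0 []).length : Int) + 1)) (min d ((board.length : Int) - 1) + 1),
            PySem.List.pyGetD (PySem.List.pyGetD board i []) (d - i) 0 :=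
    fun init d => pv_foldl_sum _ _ _ init
  rw [List.foldl_ext _ _ 0 (fun init d _ => h1 init d), pv_foldl_sum _ 0 _ 0, zero_add]

-- the shear (d, i) <-> (i, j = d - i): diagonal enumeration equals the rectangular scan, for any g
theorem pv_shear (g : Int → Int → Int) (R C k : Int) :
    (∑ d ∈ Finset.Ico 0 (min k (R + C - 2) + 1),
        ∑ i ∈ Finset.Ico (max 0 (d - C + 1)) (min d (R - 1) + 1), g i (d - i))
      = ∑ i ∈ Finset.Ico 0 R, ∑ j ∈ Finset.Ico 0 C, (if i + j ≤ k then g i j else 0) := by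
  have h1 : ∀ d ∈ Finset.Ico (0 : Int) (min k (R + C - 2) + 1),
      (∑ i ∈ Finset.Ico (max 0 (d - C + 1)) (min d (R - 1) + 1), g i (d - i))
        = ∑ i ∈ Finset.Ico 0 R, (if max 0 (d - C + 1) ≤ i ∧ i < min d (R - 1) + 1 then g i (d - i) else 0) := by
    intro d _
    rw [← Finset.sum_filter]
    congr 1
    ext i
    simp only [Finset.mem_filter, Finset.mem_Ico]
    omega
  rw [Finset.sum_congr rfl h1]
  rw [show (∑ d ∈ Finset.Ico (0 : Int) (min k (R + C - 2) + 1),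
        ∑ i ∈ Finset.Ico (0 : Int) R, (if max 0 (d - C + 1) ≤ i ∧ i < min d (R - 1) + 1 then g i (d - i) else 0))
      = ∑ q ∈ (Finset.Ico (0 : Int) (min k (R + C - 2) + 1)) ×ˢ (Finset.Ico (0 : Int) R),
          (if max 0 (q.1 - C + 1) ≤ q.2 ∧ q.2 < min q.1 (R - 1) + 1 then g q.2 (q.1 - q.2) else 0)
      from (Finset.sum_product' _ _ _).symm]
  rw [show (∑ i ∈ Finset.Ico (0 : Int) R, ∑ j ∈ Finset.Ico (0 : Int) C, (if i + j ≤ k then g i j else 0))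
      = ∑ p ∈ (Finset.Ico (0 : Int) R) ×ˢ (Finset.Ico (0 : Int) C), (if p.1 + p.2 ≤ k then g p.1 p.2 else 0)
      from (Finset.sum_product' _ _ _).symm]
  rw [← Finset.sum_filter, ← Finset.sum_filter]
  apply Finset.sum_nbij' (i := fun q => (q.2, q.1 - q.2)) (j := fun p => (p.1 + p.2, p.1))
  · intro q hq
    simp only [Finset.mem_filter, Finset.mem_product, Finset.mem_Ico] at hq ⊢
    omega
  · intro p hp
    simp only [Finset.mem_filter, Finset.mem_product, Finset.mem_Ico] at hp ⊢
    omega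
  · intro q _
    simp
  · intro p _
    simp
  · intro q _
    rfl

-- ===== VERDICT (by name: the statement is the Claim_ definition above) =====
theorem solution_spec : Claim_equal_solution := by
  intro board k _ _
  unfold Spec_solution
  rw [pv_A, pv_B]
  exact (pv_shear (fun i j => PySem.List.pyGetD (PySem.List.pyGetD board i []) j 0)
    (board.length : Int) (((PySem.List.pyGetD board 0 []).length : Int)) k).symm
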